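-- pv_equiv track=rewrite | github.com/eenblam/sweep | sweep/board.py | create_board_header
-- ===== SOURCE A (Python) =====
-- def left_pad_int_to_width(i, width):
--     """Returns str repr of i, padded with spaces to <width>."""
--     assert width > 0
--     s = str(i)
--     m = len(s)
--     assert m <= width
--     diff = width - m
--     return " " * diff + s
--
-- def create_board_header(board_height, board_width):
--     """Create rows of column indices to be printed above board.
--
--     Index rows are offset by left pad to account for row indices.
--     Each index is printed vertically, bottom-aligned. Example:
--     ...      1 1 1...
--     ...7 8 9 0 1 2...
--     """
--     pad_size = len(str(board_width))
--     matrix = [["" for _ in range(board_width)] for _ in range(pad_size)]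
--     for i in range(board_width):
--         # for every column, write its index to i-th matrix column
--         padded_int = left_pad_int_to_width(i, pad_size)
--         for j, character in enumerate(padded_int):
--             matrix[j][i] = character
--
--     # pad is offset to account for padded row indexes plus two blank spaces
--     pad = ' ' * (len(str(board_height)) + 2)
--     return '\n'.join(pad + ' '.join(row) for row in matrix) + '\n'
-- ===== SOURCE B (Python) =====
-- def create_board_header(board_height, board_width):
--     """Arithmetic digit extraction: each header row is generated directly from a
--     decreasing power of ten, without building padded strings or transposing."""
--     pad_size = len(str(board_width))
--     pad = ' ' * (len(str(board_height)) + 2)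
--     lines = []
--     p = 10 ** (pad_size - 1)
--     while p >= 1:
--         row = pad
--         for i in range(board_width):
--             if i > 0:
--                 row += ' '
--             if i < p and p > 1:
--                 row += ' '
--             else:
--                 row += str(i // p % 10)
--         lines.append(row)
--         p //= 10
--     return '\n'.join(lines) + '\n'
-- ===== Notes on version B (the rewrite author's own statement) =====
-- stated objective: alternative
-- what changed: B never pads or transposes strings: it generates each header line top-down directly by arithmetic digit extraction (a decreasing power of ten p; each cell is ' ' when i < p for a non-units row, else the digit i // p % 10), replacing A's pre-allocated matrix filled by scatter-writes of padded string characters.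
import Mathlib
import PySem

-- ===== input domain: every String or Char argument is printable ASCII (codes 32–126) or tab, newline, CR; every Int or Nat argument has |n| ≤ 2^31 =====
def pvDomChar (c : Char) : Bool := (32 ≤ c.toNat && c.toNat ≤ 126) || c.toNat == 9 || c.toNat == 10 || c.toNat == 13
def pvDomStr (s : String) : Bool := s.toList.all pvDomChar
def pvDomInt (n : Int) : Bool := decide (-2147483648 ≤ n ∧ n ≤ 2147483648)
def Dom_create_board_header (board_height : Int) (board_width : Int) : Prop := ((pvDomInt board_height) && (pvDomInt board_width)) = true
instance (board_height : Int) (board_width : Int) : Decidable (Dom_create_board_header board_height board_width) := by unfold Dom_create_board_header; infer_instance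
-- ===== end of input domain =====

-- B generates each header line by arithmetic digit extraction from a decreasing power of ten,
-- instead of A's scatter-writes of padded string characters into a pre-allocated matrix;
-- objective: alternative (no string padding, no transpose, no mutation).

-- ===== PORT A =====
-- port of A's helper left_pad_int_to_width (its asserts never fire on the values A passes;
-- " " * diff with diff < 0 is "" exactly as in Python)
def pvLeftPad (i : Int) (width : Int) : List Char :=
  let s := PySem.Int.toChars i
  let m : Int := s.length
  let diff := width - m
  PySem.List.pyRepeat [' '] diff ++ s

-- port of A. Strings are handled as List Char (PySem.Chars is exact there); matrix cells are the
-- one-char strings Python stores ("" = []). Indices j (from enumerate) and i (range loop var)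
-- are nonnegative, so .toNat/List.set is Python's in-range list assignment.
def create_board_header (board_height : Int) (board_width : Int) : String :=
  let pad_size : Int := (PySem.Int.toChars board_width).length
  let matrix0 : List (List (List Char)) :=
    (PySem.List.pyRange 0 pad_size 1).map (fun _ =>
      (PySem.List.pyRange 0 board_width 1).map (fun _ => []))
  let matrix := (PySem.List.pyRange 0 board_width 1).foldl (fun M i =>
      let padded := pvLeftPad i pad_size
      (PySem.List.enumerate padded 0).foldl (fun M jc =>
        M.set jc.1.toNat ((M.getD jc.1.toNat []).set i.toNat [jc.2])) M) matrix0
  let pad := PySem.List.pyRepeat [' '] ((PySem.Int.toChars board_height).length + 2)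
  String.ofList (PySem.Chars.join ['\n']
    (matrix.map (fun row => pad ++ PySem.Chars.join [' '] row)) ++ ['\n'])

-- ===== PORT B =====
-- port of B's 'while p >= 1' loop as structural recursion on p (p strictly decreases: p //= 10)
def pvLines (pad : List Char) (bw : Int) (p : Int) (lines : List (List Char)) : List (List Char) :=
  if h : p ≥ 1 then
    let row := (PySem.List.pyRange 0 bw 1).foldl (fun r i =>
      let r := if i > 0 then r ++ [' '] else r
      if i < p ∧ p > 1 then r ++ [' ']
      else r ++ PySem.Int.toChars (PySem.Int.mod (PySem.Int.floordiv i p) 10)) pad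
    pvLines pad bw (PySem.Int.floordiv p 10) (lines ++ [row])
  else lines
termination_by p.toNat
decreasing_by
  rw [PySem.Int.floordiv_eq_ediv_of_pos (by norm_num)]
  omega

-- port of B. '10 ** (pad_size - 1)' is ported with a Nat exponent: pad_size = len(str(w)) ≥ 1
-- always, so the Python exponent is the nonnegative (pad_size - 1) exactly.
def create_board_header_alt (board_height : Int) (board_width : Int) : String :=
  let pad_size : Int := (PySem.Int.toChars board_width).length
  let pad := PySem.List.pyRepeat [' '] ((PySem.Int.toChars board_height).length + 2)
  let lines := pvLines pad board_width ((10 : Int) ^ (pad_size - 1).toNat) []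
  String.ofList (PySem.Chars.join ['\n'] lines ++ ['\n'])

-- ===== PRECONDITION & SPEC =====
def Spec_create_board_header (board_height : Int) (board_width : Int) (out : String) : Prop := out = create_board_header_alt board_height board_width
instance (board_height : Int) (board_width : Int) (out : String) : Decidable (Spec_create_board_header board_height board_width out) := by unfold Spec_create_board_header; infer_instance

-- ===== CLAIM (what is proved, stated in full; the proofs are below) =====
def Claim_equal_create_board_header : Prop := ∀ (board_height : Int) (board_width : Int), Dom_create_board_header board_height board_width → Spec_create_board_header board_height board_width (create_board_header board_height board_width)

-- ===== LEMMAS AND PROOFS =====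

-- ---- middle layer: the rjust/transpose form of the output (proof-only definitions) ----
def pvRjust (s : List Char) (w : Int) : List Char :=
  List.replicate (w.toNat - s.length) ' ' ++ s

def pvMid (board_height : Int) (board_width : Int) : String :=
  let pad_size : Int := (PySem.Int.toChars board_width).length
  let cols := (PySem.List.pyRange 0 board_width 1).map (fun i => pvRjust (PySem.Int.toChars i) pad_size)
  let pad := PySem.List.pyRepeat [' '] ((PySem.Int.toChars board_height).length + 2)
  let rows := (List.range pad_size.toNat).map (fun (j : Nat) =>
      pad ++ PySem.Chars.join [' '] (cols.map (fun c => ((PySem.List.pyGet? c (j : Int)).elim [] ([·])))))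
  String.ofList (PySem.Chars.join ['\n'] rows ++ ['\n'])

-- ---- A = pvMid ----
theorem pvLeftPad_eq_rjust (i w : Int) : pvLeftPad i w = pvRjust (PySem.Int.toChars i) w := by
  unfold pvLeftPad pvRjust
  dsimp only
  rw [PySem.List.pyRepeat_singleton]
  congr 2
  omega

theorem pv_inner_get (g : Char → List (List Char) → List (List Char)) :
    ∀ (s : List Char) (t : Nat) (M : List (List (List Char))) (j : Nat),
      ((PySem.List.enumerate s (t : Int)).foldl
        (fun M jc => M.set jc.1.toNat (g jc.2 (M.getD jc.1.toNat []))) M)[j]? =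
      (M[j]?).map (fun row => if t ≤ j ∧ j - t < s.length then g (s.getD (j - t) ' ') row else row) := by
  intro s
  induction s with
  | nil =>
      intro t M j
      simp [PySem.List.enumerate]
  | cons c cs ih =>
      intro t M j
      rw [PySem.List.enumerate_cons]
      simp only [List.foldl_cons]
      have hcast : (t : Int) + 1 = ((t + 1 : Nat) : Int) := by push_cast; ring
      rw [hcast, ih]
      by_cases hjt : j = t
      · subst hjt
        simp only [Nat.sub_self, List.getD, Nat.le_refl, List.length_cons,
          true_and, Nat.zero_lt_succ, if_pos, List.getElem?_cons_zero, Option.getD_some]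
        cases hM : M[j]? with
        | none =>
            have hlen : ¬ j < M.length := by simpa [List.getElem?_eq_none_iff] using hM
            simp [hlen]
        | some row =>
            obtain ⟨hlen, hrow⟩ := List.getElem?_eq_some_iff.mp hM
            have hrow : M[j] = row := (List.getElem?_eq_some_iff.mp hM).2
            simp [hlen, hrow]
      · rw [List.getElem?_set_ne (by omega)]
        cases hM : M[j]? with
        | none => simp
        | some row =>
            simp only [Option.map_some]
            congr 1
            simp only [List.length_cons] at *
            split_ifs with h1 h2 h2
            · congr 1
              rcases h1 with ⟨ht, hlt⟩
              have : j - t = (j - (t+1)) + 1 := by omega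
              rw [this]
              simp [List.getD]
            · exact absurd ⟨by omega, by omega⟩ h2
            · exact absurd ⟨by omega, by omega⟩ h1
            · rfl

def pvPads (ps : Int) (i : Nat) : List Char := pvRjust (PySem.Int.toChars i) ps
def pvCell (ps : Int) (i j : Nat) : List Char :=
  if j < (pvPads ps i).length then [(pvPads ps i).getD j ' '] else []

theorem pv_set_map_range {α : Type} (N k : Nat) (hk : k < N) (f : Nat → α) (v : α) :
    ((List.range N).map f).set k v = (List.range N).map (fun i => if i = k then v else f i) := by
  apply List.ext_getElem?
  intro i
  by_cases hiN : i < N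
  · by_cases hik : i = k
    · subst hik
      simp [hiN]
    · rw [List.getElem?_set_ne (by omega)]
      simp [hiN, hik]
  · rw [List.getElem?_eq_none_iff.mpr (by simp; omega),
        List.getElem?_eq_none_iff.mpr (by simp; omega)]

theorem pv_outer (ps : Int) (P N : Nat) :
    ∀ k, k ≤ N →
      (List.range k).foldl
        (fun M (i : Nat) =>
          (PySem.List.enumerate (pvLeftPad (i : Int) ps) 0).foldl
            (fun M jc => M.set jc.1.toNat ((M.getD jc.1.toNat []).set i [jc.2])) M)
        ((List.range P).map (fun _ => (List.range N).map (fun _ => ([] : List Char))))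
      = (List.range P).map (fun j => (List.range N).map (fun i => if i < k then pvCell ps i j else [])) := by
  intro k
  induction k with
  | zero => intro _; simp
  | succ k ih =>
      intro hk
      rw [List.range_succ, List.foldl_append, ih (by omega)]
      simp only [List.foldl_cons, List.foldl_nil]
      apply List.ext_getElem?
      intro j
      have h0 : (0 : Int) = ((0 : Nat) : Int) := by norm_num
      rw [h0, pv_inner_get (fun c row => row.set k [c])]
      by_cases hjP : j < P
      · rw [List.getElem?_map, List.getElem?_map, List.getElem?_range hjP]
        simp only [Option.map_some]
        congr 1
        have hpads : pvLeftPad (k : Int) ps = pvPads ps k := pvLeftPad_eq_rjust _ _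
        rw [hpads]
        simp only [Nat.sub_zero, Nat.zero_le, true_and]
        by_cases hjs : j < (pvPads ps k).length
        · rw [if_pos hjs, pv_set_map_range N k (by omega)]
          apply List.map_congr_left
          intro i hi
          simp only [List.mem_range] at hi
          by_cases hik : i = k
          · subst hik
            simp [pvCell, hjs]
          · simp only [if_neg hik]
            have : i < k ↔ i < k + 1 := by omega
            simp [this]
        · rw [if_neg hjs]
          apply List.map_congr_left
          intro i hi
          simp only [List.mem_range] at hi
          by_cases hik : i = k
          · subst hik
            simp [pvCell, hjs]
          · have : i < k ↔ i < k + 1 := by omega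
            simp [this]
      · rw [List.getElem?_eq_none_iff.mpr (by simpa using hjP),
            List.getElem?_eq_none_iff.mpr (by simpa using hjP)]
        simp

theorem pv_get_cell (ps : Int) (i j : Nat) :
    (PySem.List.pyGet? (pvPads ps i) (j : Int)).elim [] ([·]) = pvCell ps i j := by
  rw [PySem.List.pyGet?_natCast]
  unfold pvCell
  by_cases h : j < (pvPads ps i).length
  · rw [if_pos h, List.getElem?_eq_getElem h]
    simp [List.getD_eq_getElem?_getD, List.getElem?_eq_getElem h]
  · rw [if_neg h, List.getElem?_eq_none_iff.mpr (by omega)]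
    rfl

theorem pv_get_cell' (ps : Int) (i j : Nat) :
    (PySem.List.pyGet? (pvRjust (PySem.Int.toChars (i : Int)) ps) (j : Int)).elim [] (fun x => [x]) = pvCell ps i j :=
  pv_get_cell ps i j

theorem pv_A_mid (bh bw : Int) : create_board_header bh bw = pvMid bh bw := by
  unfold create_board_header pvMid
  dsimp only
  rw [PySem.List.pyRange_one 0 bw, PySem.List.pyRange_one 0 ((PySem.Int.toChars bw).length : Int)]
  simp only [Int.sub_zero, Int.toNat_natCast, zero_add, List.foldl_map, List.map_map]
  simp only [Function.comp_def]
  rw [pv_outer ((PySem.Int.toChars bw).length : Int) (PySem.Int.toChars bw).length bw.toNat bw.toNat le_rfl]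
  simp only [pv_get_cell']
  congr 2
  rw [List.map_map]
  congr 1
  apply List.map_congr_left
  intro j hj
  simp only [Function.comp_def]
  congr 2
  apply List.map_congr_left
  intro i hi
  simp only [List.mem_range] at hi
  rw [if_pos hi]

-- ---- decimal-digit facts about Nat.toDigits 10 (core's fuelled printer) ----
theorem pv_tdc_shift (b : Nat) : ∀ (f n : Nat) (ds : List Char),
    Nat.toDigitsCore b f n ds = Nat.toDigitsCore b f n [] ++ ds := by
  intro f
  induction f with
  | zero => intro n ds; simp [Nat.toDigitsCore]
  | succ f ih =>
      intro n ds
      simp only [Nat.toDigitsCore]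
      by_cases h : n / b = 0
      · simp [h]
      · rw [if_neg h, if_neg h, ih (n / b) ((n % b).digitChar :: ds),
            ih (n / b) [(n % b).digitChar]]
        simp

theorem pv_tdc_fuel : ∀ (f₁ : Nat), ∀ (f₂ n : Nat) (ds : List Char), n < 10 ^ f₁ → n < 10 ^ f₂ →
    Nat.toDigitsCore 10 (f₁ + 1) n ds = Nat.toDigitsCore 10 (f₂ + 1) n ds := by
  intro f₁
  induction f₁ with
  | zero =>
      intro f₂ n ds h1 h2
      have hn : n = 0 := by omega
      subst hn
      cases f₂ with
      | zero => rfl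
      | succ f₂ => simp [Nat.toDigitsCore]
  | succ f₁ ih =>
      intro f₂ n ds h1 h2
      by_cases h : n / 10 = 0
      · cases f₂ with
        | zero =>
            have hn : n = 0 := by omega
            subst hn
            simp [Nat.toDigitsCore]
        | succ f₂ => simp [Nat.toDigitsCore, h]
      · cases f₂ with
        | zero =>
            have : n = 0 := by omega
            omega
        | succ f₂ =>
            simp only [Nat.toDigitsCore, if_neg h]
            exact ih f₂ (n / 10) _
              ((Nat.div_lt_iff_lt_mul (by norm_num : 0 < 10)).mpr (by rw [← pow_succ]; exact h1))
              ((Nat.div_lt_iff_lt_mul (by norm_num : 0 < 10)).mpr (by rw [← pow_succ]; exact h2))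

theorem pv_n_lt_pow (n : Nat) : n < 10 ^ n := by
  induction n with
  | zero => norm_num
  | succ n ih =>
      calc n + 1 ≤ 10 ^ n + 1 := by omega
        _ < 10 ^ (n + 1) := by have : 1 ≤ 10 ^ n := Nat.one_le_pow _ _ (by norm_num); omega

theorem pv_toDigits_small (n : Nat) (h : n < 10) : Nat.toDigits 10 n = [Nat.digitChar n] := by
  unfold Nat.toDigits
  simp [Nat.toDigitsCore, Nat.div_eq_of_lt h, Nat.mod_eq_of_lt h]

theorem pv_toDigits_rec (n : Nat) (h : 10 ≤ n) :
    Nat.toDigits 10 n = Nat.toDigits 10 (n / 10) ++ [Nat.digitChar (n % 10)] := by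
  have hd : n / 10 ≠ 0 := by omega
  have step : Nat.toDigits 10 n = Nat.toDigitsCore 10 n (n / 10) [(n % 10).digitChar] := by
    unfold Nat.toDigits
    simp [Nat.toDigitsCore, hd]
  rw [step, pv_tdc_shift]
  congr 1
  unfold Nat.toDigits
  obtain ⟨m, rfl⟩ : ∃ m, n = m + 1 := ⟨n - 1, by omega⟩
  have h1 : (m + 1) / 10 < 10 ^ m := by
    have hle : (m + 1) / 10 ≤ m := by omega
    calc (m + 1) / 10 ≤ m := hle
      _ < 10 ^ m := pv_n_lt_pow m
  exact pv_tdc_fuel m ((m + 1) / 10) ((m + 1) / 10) [] h1 (pv_n_lt_pow _)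

theorem pv_len_pos (n : Nat) : 1 ≤ (Nat.toDigits 10 n).length := by
  by_cases h : n < 10
  · rw [pv_toDigits_small n h]; simp
  · rw [pv_toDigits_rec n (by omega)]; simp

theorem pv_lt_pow_len (n : Nat) : n < 10 ^ (Nat.toDigits 10 n).length := by
  induction n using Nat.strong_induction_on with
  | _ n ih =>
      by_cases h : n < 10
      · rw [pv_toDigits_small n h]
        simpa using h
      · rw [pv_toDigits_rec n (by omega)]
        have hlt : n / 10 < n := Nat.div_lt_self (by omega) (by norm_num)
        have := ih (n / 10) hlt
        simp only [List.length_append, List.length_cons, List.length_nil]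
        have h10 : n < (n / 10 + 1) * 10 := by omega
        calc n < (n / 10 + 1) * 10 := h10
          _ ≤ 10 ^ (Nat.toDigits 10 (n / 10)).length * 10 := by
              have : n / 10 + 1 ≤ 10 ^ (Nat.toDigits 10 (n / 10)).length := this
              exact Nat.mul_le_mul_right 10 this
          _ = 10 ^ ((Nat.toDigits 10 (n / 10)).length + 1) := by ring

theorem pv_pow_len_le (n : Nat) (h : n ≠ 0) : 10 ^ ((Nat.toDigits 10 n).length - 1) ≤ n := by
  induction n using Nat.strong_induction_on with
  | _ n ih =>
      by_cases hs : n < 10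
      · rw [pv_toDigits_small n hs]
        simpa using Nat.one_le_iff_ne_zero.mpr h
      · rw [pv_toDigits_rec n (by omega)]
        have hlt : n / 10 < n := Nat.div_lt_self (by omega) (by norm_num)
        have hne : n / 10 ≠ 0 := by omega
        have := ih (n / 10) hlt hne
        simp only [List.length_append, List.length_cons, List.length_nil]
        have hL : 1 ≤ (Nat.toDigits 10 (n / 10)).length := pv_len_pos _
        have heq : (Nat.toDigits 10 (n / 10)).length + 1 - 1 = ((Nat.toDigits 10 (n / 10)).length - 1) + 1 := by omega
        rw [heq, pow_succ]
        calc 10 ^ ((Nat.toDigits 10 (n / 10)).length - 1) * 10 ≤ (n / 10) * 10 := Nat.mul_le_mul_right 10 this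
          _ ≤ n := by omega

theorem pv_getD_digit (n : Nat) : ∀ j, j < (Nat.toDigits 10 n).length →
    (Nat.toDigits 10 n).getD j ' ' = Nat.digitChar (n / 10 ^ ((Nat.toDigits 10 n).length - 1 - j) % 10) := by
  induction n using Nat.strong_induction_on with
  | _ n ih =>
      intro j hj
      by_cases hs : n < 10
      · rw [pv_toDigits_small n hs] at hj ⊢
        simp only [List.length_cons, List.length_nil] at hj
        interval_cases j
        simp [Nat.mod_eq_of_lt hs]
      · rw [pv_toDigits_rec n (by omega)] at hj ⊢
        have hlt : n / 10 < n := Nat.div_lt_self (by omega) (by norm_num)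
        simp only [List.length_append, List.length_cons, List.length_nil] at hj ⊢
        set m := (Nat.toDigits 10 (n / 10)).length with hm
        by_cases hjm : j < m
        · rw [List.getD_append _ _ _ _ hjm, ih (n / 10) hlt j hjm]
          congr 1
          have he : m + 1 - 1 - j = (m - 1 - j) + 1 := by omega
          rw [he, pow_succ]
          rw [Nat.div_div_eq_div_mul, Nat.mul_comm]
        · have hjeq : j = m := by omega
          subst hjeq
          rw [List.getD_append_right _ _ _ _ (le_refl m)]
          rw [show m + 1 - 1 - m = 0 by omega, Nat.sub_self]
          simp

-- ---- bridging PySem.Int.toChars to Nat.toDigits ----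
theorem pv_toChars_natCast (n : Nat) : PySem.Int.toChars (n : Int) = Nat.toDigits 10 n := by
  unfold PySem.Int.toChars
  rw [if_neg (by omega)]
  simp

theorem pv_toChars_digit (d : Nat) (h : d < 10) :
    PySem.Int.toChars (d : Int) = [Nat.digitChar d] := by
  rw [pv_toChars_natCast, pv_toDigits_small d h]

theorem pv_toChars_len_pos (n : Int) : 1 ≤ (PySem.Int.toChars n).length := by
  unfold PySem.Int.toChars
  by_cases h : n < 0
  · rw [if_pos h]; simp
  · rw [if_neg h]; exact pv_len_pos _

-- ---- the character A places at row j of column i equals B's arithmetic character ----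
theorem pv_cell_arith (ps i j : Nat) (hps : 1 ≤ ps) (hi10 : i < 10 ^ ps) (hj : j < ps) :
    pvCell ((ps : Nat) : Int) i j =
      if i < 10 ^ (ps - 1 - j) ∧ 1 < 10 ^ (ps - 1 - j) then [' ']
      else [Nat.digitChar (i / 10 ^ (ps - 1 - j) % 10)] := by
  have hmeq : PySem.Int.toChars ((i : Nat) : Int) = Nat.toDigits 10 i := pv_toChars_natCast i
  set m := (Nat.toDigits 10 i).length with hmdef
  have hm1 : 1 ≤ m := pv_len_pos i
  have hmps : m ≤ ps := by
    by_cases hi0 : i = 0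
    · subst hi0
      rw [hmdef, pv_toDigits_small 0 (by norm_num)]
      simpa using hps
    · by_contra hgt
      have h1 : 10 ^ (m - 1) ≤ i := pv_pow_len_le i hi0
      have h2 : 10 ^ ps ≤ 10 ^ (m - 1) := Nat.pow_le_pow_right (by norm_num) (by omega)
      omega
  have hpads : pvPads ((ps : Nat) : Int) i =
      List.replicate (ps - m) ' ' ++ Nat.toDigits 10 i := by
    unfold pvPads pvRjust
    rw [hmeq]
    simp
    rw [← hmdef]
  have hlen : (pvPads ((ps : Nat) : Int) i).length = ps := by
    rw [hpads]
    simp only [List.length_append, List.length_replicate]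
    omega
  unfold pvCell
  rw [if_pos (by rw [hlen]; exact hj), hpads]
  set e := ps - 1 - j with hedef
  by_cases hcase : j < ps - m
  · -- left padding region: both sides are a space
    have hme : m ≤ e := by omega
    have hcond : i < 10 ^ e ∧ 1 < 10 ^ e := by
      constructor
      · calc i < 10 ^ m := pv_lt_pow_len i
          _ ≤ 10 ^ e := Nat.pow_le_pow_right (by norm_num) hme
      · calc 1 < 10 ^ 1 := by norm_num
          _ ≤ 10 ^ e := Nat.pow_le_pow_right (by norm_num) (by omega)
    rw [if_pos hcond]
    rw [List.getD_append _ _ _ _ (by simpa using hcase)]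
    simp
  · -- digit region
    have hcond : ¬ (i < 10 ^ e ∧ 1 < 10 ^ e) := by
      rintro ⟨hlt, h1e⟩
      have he1 : 1 ≤ e := by
        by_contra h0
        have : e = 0 := by omega
        rw [this] at h1e
        norm_num at h1e
      by_cases hi0 : i = 0
      · have : m = 1 := by
          rw [hmdef, hi0, pv_toDigits_small 0 (by norm_num)]
          simp
        omega
      · have h1 : 10 ^ (m - 1) ≤ i := pv_pow_len_le i hi0
        have h2 : 10 ^ e ≤ 10 ^ (m - 1) := Nat.pow_le_pow_right (by norm_num) (by omega)
        omega
    rw [if_neg hcond]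
    rw [List.getD_append_right _ _ _ _ (by simp; omega)]
    simp only [List.length_replicate]
    rw [pv_getD_digit i (j - (ps - m)) (by rw [← hmdef]; omega)]
    rw [← hmdef, show m - 1 - (j - (ps - m)) = e from by omega]

-- ---- loop shapes of B ----
theorem pv_join_append (sep : List Char) :
    ∀ (l : List (List Char)) (x : List Char), l ≠ [] →
      PySem.Chars.join sep (l ++ [x]) = PySem.Chars.join sep l ++ sep ++ x := by
  intro l
  induction l with
  | nil => intro x h; exact absurd rfl h
  | cons a t ih =>
      intro x _
      cases t with
      | nil =>
          rw [List.singleton_append, PySem.Chars.join_cons_cons,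
            PySem.Chars.join_singleton, PySem.Chars.join_singleton]
      | cons b t' =>
          rw [List.cons_append, List.cons_append, PySem.Chars.join_cons_cons,
              ← List.cons_append, ih x (by simp), PySem.Chars.join_cons_cons]
          simp [List.append_assoc]

theorem pv_fold_row (c : Nat → List Char) :
    ∀ (N : Nat) (init : List Char),
      (List.range N).foldl (fun r (k : Nat) => (if (0 : Int) < (k : Int) then r ++ [' '] else r) ++ c k) init
        = init ++ PySem.Chars.join [' '] ((List.range N).map c) := by
  intro N
  induction N with
  | zero => intro init; simp [PySem.Chars.join_nil]
  | succ N ih =>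
      intro init
      rw [List.range_succ, List.foldl_append, ih, List.map_append]
      simp only [List.foldl_cons, List.foldl_nil, List.map_cons, List.map_nil]
      cases N with
      | zero =>
          simp [PySem.Chars.join_singleton, PySem.Chars.join_nil]
      | succ N' =>
          rw [if_pos (by exact_mod_cast Nat.succ_pos N')]
          rw [pv_join_append [' '] _ (c (N' + 1)) (by simp)]
          simp [List.append_assoc]

-- the row B's inner for-loop produces for power 10^e
def pvRowB (pad : List Char) (bw : Int) (e : Nat) : List Char :=
  (PySem.List.pyRange 0 bw 1).foldl (fun r i =>
      let r := if i > 0 then r ++ [' '] else r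
      if i < (10 : Int) ^ e ∧ (10 : Int) ^ e > 1 then r ++ [' ']
      else r ++ PySem.Int.toChars (PySem.Int.mod (PySem.Int.floordiv i ((10 : Int) ^ e)) 10)) pad

theorem pv_lines_spec (pad : List Char) (bw : Int) :
    ∀ (k : Nat) (acc : List (List Char)),
      pvLines pad bw ((10 : Int) ^ k) acc = acc ++ (List.range (k + 1)).reverse.map (pvRowB pad bw) := by
  intro k
  induction k with
  | zero =>
      intro acc
      rw [pvLines]
      rw [dif_pos (by norm_num)]
      have hfd : PySem.Int.floordiv ((10 : Int) ^ 0) 10 = 0 := by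
        rw [PySem.Int.floordiv_eq_ediv_of_pos (by norm_num)]
        norm_num
      rw [hfd, pvLines, dif_neg (by norm_num)]
      simp [pvRowB]
  | succ k ih =>
      intro acc
      rw [pvLines]
      rw [dif_pos (show (10 : Int) ^ (k + 1) ≥ 1 from one_le_pow₀ (by norm_num))]
      have hfd : PySem.Int.floordiv ((10 : Int) ^ (k + 1)) 10 = (10 : Int) ^ k := by
        rw [PySem.Int.floordiv_eq_ediv_of_pos (by norm_num), pow_succ]
        exact Int.mul_ediv_cancel _ (by norm_num)
      rw [hfd, ih]
      have : (List.range (k + 1 + 1)).reverse = (k + 1) :: (List.range (k + 1)).reverse := by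
        rw [List.range_succ, List.reverse_append]
        simp
      rw [this]
      simp [pvRowB, List.append_assoc]

-- ---- pvMid = B ----
theorem pv_row_eq (bw : Int) (L j : Nat) (pad : List Char)
    (hL : L = (PySem.Int.toChars bw).length) (hj : j < L) :
    pad ++ PySem.Chars.join [' ']
        (((PySem.List.pyRange 0 bw 1).map (fun i => pvRjust (PySem.Int.toChars i) ((L : Nat) : Int))).map
          (fun c => ((PySem.List.pyGet? c (j : Int)).elim [] ([·]))))
      = pvRowB pad bw (L - 1 - j) := by
  have hL1 : 1 ≤ L := hL ▸ pv_toChars_len_pos bw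
  unfold pvRowB
  rw [PySem.List.pyRange_one 0 bw]
  simp only [List.map_map, List.foldl_map, zero_add, Int.sub_zero, Function.comp_def, gt_iff_lt]
  have hfun :
      (fun (r : List Char) (k : Nat) =>
        if (k : Int) < (10 : Int) ^ (L - 1 - j) ∧ (1 : Int) < (10 : Int) ^ (L - 1 - j) then
          (if (0 : Int) < (k : Int) then r ++ [' '] else r) ++ [' ']
        else
          (if (0 : Int) < (k : Int) then r ++ [' '] else r) ++
            PySem.Int.toChars (PySem.Int.mod (PySem.Int.floordiv (k : Int) ((10 : Int) ^ (L - 1 - j))) 10))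
      = fun (r : List Char) (k : Nat) =>
          (if (0 : Int) < (k : Int) then r ++ [' '] else r) ++
            (if (k : Int) < (10 : Int) ^ (L - 1 - j) ∧ (1 : Int) < (10 : Int) ^ (L - 1 - j) then [' ']
             else PySem.Int.toChars (PySem.Int.mod (PySem.Int.floordiv (k : Int) ((10 : Int) ^ (L - 1 - j))) 10)) := by
    funext r k
    by_cases hc : (k : Int) < (10 : Int) ^ (L - 1 - j) ∧ (1 : Int) < (10 : Int) ^ (L - 1 - j)
    · simp [hc]
    · simp [hc]
  rw [hfun]
  rw [pv_fold_row (fun k => if (k : Int) < (10 : Int) ^ (L - 1 - j) ∧ (1 : Int) < (10 : Int) ^ (L - 1 - j)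
        then [' ']
        else PySem.Int.toChars (PySem.Int.mod (PySem.Int.floordiv (k : Int) ((10 : Int) ^ (L - 1 - j))) 10))]
  congr 1
  refine congrArg (PySem.Chars.join [' ']) ?_
  apply List.map_congr_left
  intro k hk
  simp only [List.mem_range] at hk
  have hbw1 : 1 ≤ bw := by
    by_contra h
    have : bw.toNat = 0 := by omega
    omega
  have hLn : L = (Nat.toDigits 10 bw.toNat).length := by
    rw [hL, show bw = ((bw.toNat : Nat) : Int) by omega, pv_toChars_natCast]
    rw [Int.toNat_natCast]
  have hk10 : k < 10 ^ L := by
    calc k < bw.toNat := hk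
      _ < 10 ^ L := hLn ▸ pv_lt_pow_len bw.toNat
  rw [pv_get_cell' ((L : Nat) : Int) k j, pv_cell_arith L k j hL1 hk10 hj]
  set e := L - 1 - j with hedef
  have hiffl : (k : Int) < (10 : Int) ^ e ↔ k < 10 ^ e := by
    constructor
    · intro h; exact_mod_cast h
    · intro h; exact_mod_cast h
  have hiffr : (1 : Int) < (10 : Int) ^ e ↔ 1 < 10 ^ e := by
    constructor
    · intro h; exact_mod_cast h
    · intro h; exact_mod_cast h
  by_cases hcond : k < 10 ^ e ∧ 1 < 10 ^ e
  · rw [if_pos hcond, if_pos (by rw [hiffl, hiffr]; exact hcond)]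
  · rw [if_neg hcond, if_neg (by rw [hiffl, hiffr]; exact hcond)]
    have hcast : (10 : Int) ^ e = ((10 ^ e : Nat) : Int) := by push_cast; ring
    have h10 : (10 : Int) = ((10 : Nat) : Int) := by norm_num
    rw [hcast, PySem.Int.floordiv_natCast, h10, PySem.Int.mod_natCast,
      pv_toChars_digit _ (Nat.mod_lt _ (by norm_num))]

theorem pv_mid_alt (bh bw : Int) : pvMid bh bw = create_board_header_alt bh bw := by
  unfold pvMid create_board_header_alt
  dsimp only
  set L := (PySem.Int.toChars bw).length with hL
  have hL1 : 1 ≤ L := pv_toChars_len_pos bw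
  have hexp : (((L : Nat) : Int) - 1).toNat = L - 1 := by omega
  rw [hexp, show ((L : Nat) : Int).toNat = L by omega]
  rw [pv_lines_spec _ bw (L - 1) [], show (L - 1) + 1 = L by omega, List.nil_append]
  refine congrArg String.ofList (congrArg (fun l => l ++ ['\n']) (congrArg (PySem.Chars.join ['\n']) ?_))
  apply List.ext_getElem
  · simp
  · intro j hj1 hj2
    simp only [List.length_map, List.length_range] at hj1
    rw [List.getElem_map, List.getElem_map, List.getElem_range, List.getElem_reverse]
    simp only [List.length_range, List.getElem_range]
    exact pv_row_eq bw L j _ hL hj1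

theorem pv_main (bh bw : Int) : create_board_header bh bw = create_board_header_alt bh bw := by
  rw [pv_A_mid, pv_mid_alt]

-- ===== VERDICT (by name: the statement is the Claim_ definition above) =====
theorem create_board_header_spec : Claim_equal_create_board_header := by
  intro bh bw _
  exact pv_main bh bw
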